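-- pv_equiv track=rewrite | github.com/psavine42/fun-with-dnc | utils.py | interface_part
-- ===== SOURCE A (Python) =====
-- def interface_part(num_reads, W):
--     partition = [num_reads* W, num_reads, W, 1, W, W, num_reads, 1, 1, num_reads * 3]
--     ds = []
--     cntr = 0
--     for idx in partition:
--         tn = [cntr, cntr + idx]
--         ds.append(tn)
--         cntr += idx
--     return ds
-- ===== SOURCE B (Python) =====
-- def interface_part(num_reads, W):
--     # Closed form: the partition is a fixed literal, so every cumulative
--     # boundary is a known linear expression in num_reads and W; write the
--     # intervals directly with no loop and no running sum.
--     r, w = num_reads, W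
--     rw = r * w
--     return [
--         [0,                      rw],
--         [rw,                     rw + r],
--         [rw + r,                 rw + r + w],
--         [rw + r + w,             rw + r + w + 1],
--         [rw + r + w + 1,         rw + r + 2 * w + 1],
--         [rw + r + 2 * w + 1,     rw + r + 3 * w + 1],
--         [rw + r + 3 * w + 1,     rw + 2 * r + 3 * w + 1],
--         [rw + 2 * r + 3 * w + 1, rw + 2 * r + 3 * w + 2],
--         [rw + 2 * r + 3 * w + 2, rw + 2 * r + 3 * w + 3],
--         [rw + 2 * r + 3 * w + 3, rw + 5 * r + 3 * w + 3],
--     ]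
-- ===== Notes on version B (the rewrite author's own statement) =====
-- stated objective: alternative
-- what changed: Replaces the running-counter append loop with a loop-free closed form: since the partition is a fixed literal, each interval's boundaries are written directly as linear expressions in num_reads and W.
import Mathlib
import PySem

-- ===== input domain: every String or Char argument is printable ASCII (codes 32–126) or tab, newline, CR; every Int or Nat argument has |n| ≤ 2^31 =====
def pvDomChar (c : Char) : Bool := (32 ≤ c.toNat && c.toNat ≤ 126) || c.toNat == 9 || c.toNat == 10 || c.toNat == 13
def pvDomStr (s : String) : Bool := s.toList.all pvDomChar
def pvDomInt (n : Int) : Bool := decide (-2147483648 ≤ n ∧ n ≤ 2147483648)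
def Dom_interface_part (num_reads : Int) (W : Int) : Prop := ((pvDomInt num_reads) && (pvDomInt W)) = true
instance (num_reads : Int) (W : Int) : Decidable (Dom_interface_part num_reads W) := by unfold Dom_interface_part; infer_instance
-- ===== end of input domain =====

-- B replaces A's running-counter loop with a loop-free closed form over the fixed partition (alternative decomposition; same cost).

-- ===== PORT A =====
-- literal port of A: fold over the partition carrying (ds, cntr)
def interface_part (num_reads : Int) (W : Int) : List (List Int) :=
  let partition : List Int :=
    [num_reads * W, num_reads, W, 1, W, W, num_reads, 1, 1, num_reads * 3]
  let res := partition.foldl (fun (st : List (List Int) × Int) idx =>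
    let tn := [st.2, st.2 + idx]
    (st.1 ++ [tn], st.2 + idx)) ([], 0)
  res.1

-- ===== PORT B =====
-- Source B: loop-free closed form; each boundary is an explicit linear expression in num_reads and W
def interface_part_alt (num_reads : Int) (W : Int) : List (List Int) :=
  let r := num_reads
  let w := W
  let rw := r * w
  [ [0,                      rw],
    [rw,                     rw + r],
    [rw + r,                 rw + r + w],
    [rw + r + w,             rw + r + w + 1],
    [rw + r + w + 1,         rw + r + 2 * w + 1],
    [rw + r + 2 * w + 1,     rw + r + 3 * w + 1],
    [rw + r + 3 * w + 1,     rw + 2 * r + 3 * w + 1],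
    [rw + 2 * r + 3 * w + 1, rw + 2 * r + 3 * w + 2],
    [rw + 2 * r + 3 * w + 2, rw + 2 * r + 3 * w + 3],
    [rw + 2 * r + 3 * w + 3, rw + 5 * r + 3 * w + 3] ]

-- ===== PRECONDITION & SPEC =====
def Spec_interface_part (num_reads : Int) (W : Int) (out : List (List Int)) : Prop := out = interface_part_alt num_reads W
instance (num_reads : Int) (W : Int) (out : List (List Int)) : Decidable (Spec_interface_part num_reads W out) := by unfold Spec_interface_part; infer_instance

-- ===== CLAIM (what is proved, stated in full; the proofs are below) =====
def Claim_equal_interface_part : Prop := ∀ (num_reads : Int) (W : Int), Dom_interface_part num_reads W → Spec_interface_part num_reads W (interface_part num_reads W)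

-- ===== LEMMAS AND PROOFS =====

-- ===== VERDICT (by name: the statement is the Claim_ definition above) =====
theorem interface_part_spec : Claim_equal_interface_part := by
  intro num_reads W _
  show _ = _
  simp only [interface_part, interface_part_alt, List.foldl, List.nil_append,
    List.cons_append]
  norm_num
  and_intros <;> ring
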